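-- pv_equiv track=rewrite | github.com/ishangote/Coding-Interviews-Python | Leetcode/434 Number of Segments in a String/number_of_segments.py | number_of_segments
-- ===== SOURCE A (Python) =====
-- def number_of_segments(input_string):
--     whitespace = " "
--     idx, res = 0, 0
--
--     while True:
--         if idx >= len(input_string):
--             break
--
--         if idx < len(input_string) and input_string[idx] == whitespace:
--             while idx < len(input_string) and input_string[idx] == whitespace:
--                 idx += 1
--
--         if idx < len(input_string) and input_string[idx] != whitespace:
--             res += 1
--             while idx < len(input_string) and input_string[idx] != whitespace:
--                 idx += 1
--
--     return res
-- ===== SOURCE B (Python) =====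
-- def number_of_segments(input_string):
--     res = 0
--     prev = ' '
--     for ch in input_string:
--         if ch != ' ' and prev == ' ':
--             res += 1
--         prev = ch
--     return res
-- ===== Notes on version B (the rewrite author's own statement) =====
-- stated objective: simpler
-- what changed: Replaced A's two-phase nested skip-spaces/skip-word loops with a single pass that counts segment starts (a non-space character whose predecessor is a space).
import Mathlib
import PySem

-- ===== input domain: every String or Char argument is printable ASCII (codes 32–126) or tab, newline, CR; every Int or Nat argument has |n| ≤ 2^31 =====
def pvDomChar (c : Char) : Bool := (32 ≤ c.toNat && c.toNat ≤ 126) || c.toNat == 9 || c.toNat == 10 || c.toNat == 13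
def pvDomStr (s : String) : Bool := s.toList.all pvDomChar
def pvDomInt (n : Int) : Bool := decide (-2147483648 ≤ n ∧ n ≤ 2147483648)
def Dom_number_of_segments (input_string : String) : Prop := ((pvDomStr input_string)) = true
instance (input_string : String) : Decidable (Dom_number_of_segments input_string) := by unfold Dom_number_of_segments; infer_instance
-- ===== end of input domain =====

-- B replaces A's nested skip-spaces/skip-word loops by one pass counting segment starts; return values proved equal.
-- ===== PORT A =====
-- inner loop: while idx < len and s[idx] == ' ': idx += 1
def pvSkipSp : List Char → List Char
  | [] => []
  | c :: cs => if c = ' ' then pvSkipSp cs else c :: cs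

-- inner loop: while idx < len and s[idx] != ' ': idx += 1
def pvSkipWord : List Char → List Char
  | [] => []
  | c :: cs => if c ≠ ' ' then pvSkipWord cs else c :: cs

theorem pvSkipSp_len : ∀ l : List Char, (pvSkipSp l).length ≤ l.length
  | [] => le_refl _
  | c :: cs => by
    simp only [pvSkipSp]; split
    · exact le_trans (pvSkipSp_len cs) (Nat.le_succ _)
    · simp

theorem pvSkipWord_len : ∀ l : List Char, (pvSkipWord l).length ≤ l.length
  | [] => le_refl _
  | c :: cs => by
    simp only [pvSkipWord]; split
    · exact le_trans (pvSkipWord_len cs) (Nat.le_succ _)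
    · simp

-- outer 'while True' loop of A over the remaining characters
def pvLoopA : List Char → Int → Int
  | [], res => res
  | c :: cs, res =>
    if c = ' ' then pvLoopA (pvSkipSp cs) res
    else pvLoopA (pvSkipWord cs) (res + 1)
termination_by l _ => l.length
decreasing_by
  · exact Nat.lt_succ_of_le (pvSkipSp_len cs)
  · exact Nat.lt_succ_of_le (pvSkipWord_len cs)

def number_of_segments (input_string : String) : Int := pvLoopA input_string.toList 0

-- ===== PORT B =====
def pvStepB (st : Int × Char) (ch : Char) : Int × Char :=
  (if ch ≠ ' ' ∧ st.2 = ' ' then st.1 + 1 else st.1, ch)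

def number_of_segments_alt (input_string : String) : Int :=
  (input_string.toList.foldl pvStepB (0, ' ')).1

-- ===== PRECONDITION & SPEC =====
def Spec_number_of_segments (input_string : String) (out : Int) : Prop := out = number_of_segments_alt input_string
instance (input_string : String) (out : Int) : Decidable (Spec_number_of_segments input_string out) := by unfold Spec_number_of_segments; infer_instance

-- ===== CLAIM (what is proved, stated in full; the proofs are below) =====
def Claim_equal_number_of_segments : Prop := ∀ (input_string : String), Dom_number_of_segments input_string → Spec_number_of_segments input_string (number_of_segments input_string)

-- ===== LEMMAS AND PROOFS =====

theorem pv_fold_skipSp : ∀ (cs : List Char) (res : Int),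
    (List.foldl pvStepB (res, ' ') cs).1 = (List.foldl pvStepB (res, ' ') (pvSkipSp cs)).1 := by
  intro cs
  induction cs with
  | nil => intro res; rfl
  | cons c cs ih =>
    intro res
    by_cases h : c = ' '
    · simp [pvSkipSp, h, pvStepB, List.foldl, ih res]
    · simp [pvSkipSp, h]

theorem pv_fold_skipWord : ∀ (cs : List Char) (res : Int) (p : Char), p ≠ ' ' →
    (List.foldl pvStepB (res, p) cs).1 = (List.foldl pvStepB (res, ' ') (pvSkipWord cs)).1 := by
  intro cs
  induction cs with
  | nil => intro res p hp; rfl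
  | cons c cs ih =>
    intro res p hp
    by_cases h : c = ' '
    · subst h
      simp [pvSkipWord, List.foldl, pvStepB, hp]
    · simp only [pvSkipWord, h, ne_eq, not_false_eq_true, if_pos, List.foldl, pvStepB, hp]
      simp [ih _ c h]

theorem pv_loopA_eq_fold : ∀ (l : List Char) (res : Int),
    pvLoopA l res = (List.foldl pvStepB (res, ' ') l).1 := by
  intro l res
  fun_induction pvLoopA l res with
  | case1 res => rfl
  | case2 cs res ih =>
    rw [ih]
    simp [List.foldl, pvStepB, ← pv_fold_skipSp]
  | case3 c cs res h ih =>
    rw [ih]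
    simp only [List.foldl, pvStepB, h, ne_eq, not_false_eq_true, true_and, if_pos]
    exact (pv_fold_skipWord cs (res + 1) c h).symm

-- ===== VERDICT (by name: the statement is the Claim_ definition above) =====
theorem number_of_segments_spec : Claim_equal_number_of_segments := by
  intro s _
  unfold Spec_number_of_segments number_of_segments number_of_segments_alt
  exact pv_loopA_eq_fold s.toList 0
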